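-- pv_equiv track=rewrite | github.com/ashioyajotham/Elimu-Research-Assistant | elimu_react/tools/search.py | _prioritize_kenyan_domains
-- ===== SOURCE A (Python) =====
-- from typing import Any, Dict, Optional
--
-- def _prioritize_kenyan_domains(results: Any) -> Any:
--     kenyan_domains = (
--         "kicd.ac.ke",
--         "go.ke",
--         "ac.ke",
--         "co.ke",
--         "or.ke",
--         "nation.africa",
--         "standardmedia.co.ke",
--     )
--
--     def is_kenyan(link: Optional[str]) -> bool:
--         if not link:
--             return False
--         lower_link = link.lower()
--         return any(domain in lower_link for domain in kenyan_domains)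
--
--     prioritized = [res for res in results if is_kenyan(res.get("link"))]
--     remainder = [res for res in results if res not in prioritized]
--     return prioritized + remainder
-- ===== SOURCE B (Python) =====
-- def _prioritize_kenyan_domains(results):
--     kenyan_domains = (
--         "kicd.ac.ke",
--         "go.ke",
--         "ac.ke",
--         "co.ke",
--         "or.ke",
--         "nation.africa",
--         "standardmedia.co.ke",
--     )
--
--     def is_kenyan(link):
--         if not link:
--             return False
--         lower_link = link.lower()
--         return any(domain in lower_link for domain in kenyan_domains)
--
--     prioritized = []
--     remainder = []
--     for res in results:
--         (prioritized if is_kenyan(res.get("link")) else remainder).append(res)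
--     return prioritized + remainder
-- ===== Notes on version B (the rewrite author's own statement) =====
-- stated objective: simpler
-- what changed: A builds the Kenyan list by one comprehension and then rescans results testing each element for membership in that list; B makes a single pass appending each result to one of two accumulators and concatenates them, removing the second pass and the membership scan.
import Mathlib
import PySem

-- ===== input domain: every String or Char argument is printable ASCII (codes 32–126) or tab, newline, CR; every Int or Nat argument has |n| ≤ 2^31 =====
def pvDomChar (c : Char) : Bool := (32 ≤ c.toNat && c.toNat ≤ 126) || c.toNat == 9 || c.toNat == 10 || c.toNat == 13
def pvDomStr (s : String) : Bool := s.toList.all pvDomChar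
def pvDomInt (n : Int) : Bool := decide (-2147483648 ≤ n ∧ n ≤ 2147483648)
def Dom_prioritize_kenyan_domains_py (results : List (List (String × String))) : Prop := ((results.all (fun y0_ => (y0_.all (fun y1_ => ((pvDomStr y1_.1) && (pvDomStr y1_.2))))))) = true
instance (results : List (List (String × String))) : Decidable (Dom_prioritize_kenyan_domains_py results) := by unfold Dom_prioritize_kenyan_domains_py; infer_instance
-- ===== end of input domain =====

-- B replaces A's two-comprehension partition (second pass tests membership in the first pass's
-- output) with a single pass into two accumulators; same return value.

-- ===== PORT A =====
def pvKenyanDomains : List String :=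
  ["kicd.ac.ke", "go.ke", "ac.ke", "co.ke", "or.ke", "nation.africa", "standardmedia.co.ke"]

-- is_kenyan(link): `if not link` is true for None and for the empty string
def pvIsKenyan (link : Option String) : Bool :=
  match link with
  | none => false
  | some l =>
    if l = "" then false
    else
      let lower_link := PySem.Str.lower l
      pvKenyanDomains.any (fun domain => PySem.Str.isIn domain lower_link)

def prioritize_kenyan_domains_py (results : List (List (String × String))) : List (List (String × String)) :=
  let prioritized := results.filter (fun res => pvIsKenyan ((PySem.Dict.mk res).get? "link"))
  let remainder := results.filter (fun res => !(prioritized.contains res))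
  prioritized ++ remainder

-- ===== PORT B =====
def prioritize_kenyan_domains_py_alt (results : List (List (String × String))) : List (List (String × String)) :=
  let acc := results.foldl
    (fun (acc : List (List (String × String)) × List (List (String × String))) res =>
      if pvIsKenyan ((PySem.Dict.mk res).get? "link") then (acc.1 ++ [res], acc.2)
      else (acc.1, acc.2 ++ [res]))
    ([], [])
  acc.1 ++ acc.2

-- ===== PRECONDITION & SPEC =====
def Spec_prioritize_kenyan_domains_py (results : List (List (String × String))) (out : List (List (String × String))) : Prop := out = prioritize_kenyan_domains_py_alt results
instance (results : List (List (String × String))) (out : List (List (String × String))) : Decidable (Spec_prioritize_kenyan_domains_py results out) := by unfold Spec_prioritize_kenyan_domains_py; infer_instance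

-- ===== CLAIM (what is proved, stated in full; the proofs are below) =====
def Claim_equal_prioritize_kenyan_domains_py : Prop := ∀ (results : List (List (String × String))), Dom_prioritize_kenyan_domains_py results → Spec_prioritize_kenyan_domains_py results (prioritize_kenyan_domains_py results)

-- ===== LEMMAS AND PROOFS =====

-- the fold in B with accumulators (p, r) appends the Kenyan / non-Kenyan elements of xs
theorem pvFoldB (xs : List (List (String × String)))
    (p r : List (List (String × String))) :
    xs.foldl
      (fun (acc : List (List (String × String)) × List (List (String × String))) res =>
        if pvIsKenyan ((PySem.Dict.mk res).get? "link") then (acc.1 ++ [res], acc.2)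
        else (acc.1, acc.2 ++ [res]))
      (p, r)
    = (p ++ xs.filter (fun res => pvIsKenyan ((PySem.Dict.mk res).get? "link")),
       r ++ xs.filter (fun res => !(pvIsKenyan ((PySem.Dict.mk res).get? "link")))) := by
  induction xs generalizing p r with
  | nil => simp
  | cons x t ih =>
    by_cases h : pvIsKenyan ((PySem.Dict.mk x).get? "link")
    · simp [List.foldl_cons, h, ih]
    · simp [List.foldl_cons, h, ih]

-- on elements of results, membership in the prioritized (filtered) list IS the Kenyan test
theorem pvMemFilter (results : List (List (String × String)))
    (res : List (String × String)) (h : res ∈ results) :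
    (results.filter (fun r => pvIsKenyan ((PySem.Dict.mk r).get? "link"))).contains res
      = pvIsKenyan ((PySem.Dict.mk res).get? "link") := by
  by_cases hk : pvIsKenyan ((PySem.Dict.mk res).get? "link")
  · simp only [hk, List.contains_eq_mem, decide_eq_true_eq]
    exact List.mem_filter.mpr ⟨h, by simp [hk]⟩
  · simp only [hk, List.contains_eq_mem, decide_eq_false_iff_not]
    intro hm
    exact hk (by simpa using (List.mem_filter.mp hm).2)

-- ===== VERDICT (by name: the statement is the Claim_ definition above) =====
theorem prioritize_kenyan_domains_py_spec : Claim_equal_prioritize_kenyan_domains_py := by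
  intro results _
  unfold Spec_prioritize_kenyan_domains_py prioritize_kenyan_domains_py prioritize_kenyan_domains_py_alt
  rw [pvFoldB]
  have h2 : results.filter
      (fun res => !((results.filter (fun r => pvIsKenyan ((PySem.Dict.mk r).get? "link"))).contains res))
      = results.filter (fun res => !(pvIsKenyan ((PySem.Dict.mk res).get? "link"))) :=
    List.filter_congr (fun res hres => by rw [pvMemFilter results res hres])
  simp only [h2, List.nil_append]
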